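-- pv_equiv track=rewrite | github.com/elliotG49/ML-DGA-Predictor | scripts/features/uncommon_bigrams_count.py | count_uncommon_bigrams
-- ===== SOURCE A (Python) =====
-- def count_uncommon_bigrams(domain: str, uncommon_bigrams: set) -> int:
--     """
--     Count how many bigrams (pairs of consecutive chars) in 'domain'
--     appear in the set 'uncommon_bigrams'.
--     """
--     domain_lower = domain.lower()
--     count = 0
--     for i in range(len(domain_lower) - 1):
--         bigram = domain_lower[i : i + 2]
--         if bigram in uncommon_bigrams:
--             count += 1
--     return count
-- ===== SOURCE B (Python) =====
-- def count_uncommon_bigrams(domain: str, uncommon_bigrams: set) -> int: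
--     """
--     Count how many bigrams (pairs of consecutive chars) in 'domain'
--     appear in the set 'uncommon_bigrams'.
--     """
--     s = domain.lower()
--     freq = {}
--     for a, b in zip(s, s[1:]):
--         bg = a + b
--         freq[bg] = freq.get(bg, 0) + 1
--     return sum(c for bg, c in freq.items() if bg in uncommon_bigrams)
-- ===== Notes on version B (the rewrite author's own statement) =====
-- stated objective: alternative
-- what changed: Replaces the per-position membership test over an index loop with a frequency table of bigrams (built in one pass over adjacent character pairs via zip) followed by a sum over the distinct bigrams weighted by their multiplicities.
import Mathlib
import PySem

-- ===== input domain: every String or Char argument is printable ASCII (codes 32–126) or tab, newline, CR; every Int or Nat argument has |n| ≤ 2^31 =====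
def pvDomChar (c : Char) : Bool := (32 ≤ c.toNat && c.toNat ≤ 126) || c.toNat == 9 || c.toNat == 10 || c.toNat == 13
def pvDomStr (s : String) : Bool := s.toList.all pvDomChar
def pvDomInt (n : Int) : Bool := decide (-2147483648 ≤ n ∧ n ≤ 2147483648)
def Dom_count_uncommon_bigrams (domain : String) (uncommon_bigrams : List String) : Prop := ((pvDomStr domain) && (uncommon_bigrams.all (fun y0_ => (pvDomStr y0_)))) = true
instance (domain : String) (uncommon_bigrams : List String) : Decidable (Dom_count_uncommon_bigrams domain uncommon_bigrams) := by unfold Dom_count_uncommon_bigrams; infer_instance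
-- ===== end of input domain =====

-- B replaces the per-position membership test by a bigram frequency table summed over its distinct keys (alternative decomposition, same result).

-- ===== PORT A =====
def count_uncommon_bigrams (domain : String) (uncommon_bigrams : List String) : Int :=
  let domain_lower := PySem.Str.lower domain
  (PySem.List.pyRange 0 (PySem.Str.len domain_lower - 1) 1).foldl
    (fun count i =>
      if PySem.Set.contains uncommon_bigrams (PySem.Str.slice domain_lower (some i) (some (i + 2)))
      then count + 1 else count) 0

-- ===== PORT B =====
def count_uncommon_bigrams_alt (domain : String) (uncommon_bigrams : List String) : Int :=
  let s := (PySem.Str.lower domain).toList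
  let bigrams := (s.zip s.tail).map (fun p => String.ofList [p.1, p.2])
  let freq : PySem.Dict String Int :=
    bigrams.foldl (fun d bg => d.insert bg (d.getD bg 0 + 1)) PySem.Dict.empty
  ((freq.items.filter (fun p => PySem.Set.contains uncommon_bigrams p.1)).map (fun p => p.2)).sum

-- ===== PRECONDITION & SPEC =====
def Spec_count_uncommon_bigrams (domain : String) (uncommon_bigrams : List String) (out : Int) : Prop := out = count_uncommon_bigrams_alt domain uncommon_bigrams
instance (domain : String) (uncommon_bigrams : List String) (out : Int) : Decidable (Spec_count_uncommon_bigrams domain uncommon_bigrams out) := by unfold Spec_count_uncommon_bigrams; infer_instance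

-- ===== CLAIM (what is proved, stated in full; the proofs are below) =====
def Claim_equal_count_uncommon_bigrams : Prop := ∀ (domain : String) (uncommon_bigrams : List String), Dom_count_uncommon_bigrams domain uncommon_bigrams → Spec_count_uncommon_bigrams domain uncommon_bigrams (count_uncommon_bigrams domain uncommon_bigrams)

-- ===== LEMMAS AND PROOFS =====

-- The index-and-slice bigram list equals the zip-of-adjacent-pairs bigram list.
lemma bigrams_eq (s : String) :
    (PySem.List.pyRange 0 (PySem.Str.len s - 1) 1).map
      (fun i => PySem.Str.slice s (some i) (some (i + 2)))
    = (s.toList.zip s.toList.tail).map (fun p => String.ofList [p.1, p.2]) := by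
  apply List.ext_getElem
  · simp [PySem.List.length_pyRange_one]
  · intro k h1 h2
    simp only [List.getElem_map, PySem.List.getElem_pyRange_one, List.getElem_zip,
      List.getElem_tail]
    have hk : k + 1 < s.toList.length := by
      have hlen : s.toList.length = s.length := by simp
      simp at h2
      omega
    apply String.toList_injective
    rw [PySem.Str.toList_slice]
    have h0 : (0 : Int) + (k : Int) = ((k : Nat) : Int) := by omega
    rw [h0, PySem.Chars.slice_eq_listSlice, PySem.List.slice_toNat _ (by omega) (by omega)]
    have ht : ((k : Int).toNat) = k := by omega
    have ht2 : (((k : Int) + 2).toNat) = k + 2 := by omega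
    rw [ht, ht2]
    rw [List.drop_eq_getElem_cons (by omega), List.drop_eq_getElem_cons (by omega)]
    rw [show k + 2 - k = 2 from by omega]
    rw [show ∀ (a b : Char) (t : List Char), List.take 2 (a :: b :: t) = [a, b] from fun _ _ _ => rfl]
    simp

-- Indicator sum over a nodup list restricted by a filter.
lemma sum_indicator_not_mem (K : List String) (x : String) (hx : x ∉ K) :
    (K.map (fun k => if k = x then (1 : Int) else 0)).sum = 0 := by
  induction K with
  | nil => simp
  | cons y K ih =>
    simp only [List.mem_cons, not_or] at hx
    rw [List.map_cons, List.sum_cons, if_neg (fun h => hx.1 h.symm), ih hx.2]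
    simp

lemma sum_indicator (K : List String) (x : String) (p : String → Bool)
    (hnd : K.Nodup) (hx : x ∈ K) :
    ((K.filter p).map (fun k => if k = x then (1 : Int) else 0)).sum
      = if p x then 1 else 0 := by
  induction K with
  | nil => simp at hx
  | cons y K ih =>
    rcases List.nodup_cons.mp hnd with ⟨hyK, hndK⟩
    rcases List.mem_cons.mp hx with h | h
    · subst h
      have h0 : ((K.filter p).map (fun k => if k = x then (1 : Int) else 0)).sum = 0 :=
        sum_indicator_not_mem _ _ (fun hm => hyK (List.mem_of_mem_filter hm))
      by_cases hp : p x = true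
      · rw [List.filter_cons, if_pos hp, List.map_cons, List.sum_cons, if_pos rfl, h0, if_pos hp]
        norm_num
      · rw [List.filter_cons, if_neg hp, h0, if_neg hp]
    · have hne : y ≠ x := fun he => hyK (he ▸ h)
      by_cases hp : p y = true
      · rw [List.filter_cons, if_pos hp, List.map_cons, List.sum_cons, if_neg hne, ih hndK h]
        simp
      · rw [List.filter_cons, if_neg hp, ih hndK h]

-- Summing multiplicities of the distinct keys that pass p counts exactly countP p.
lemma sum_counts (L K : List String) (p : String → Bool)
    (hnd : K.Nodup) (hsub : ∀ x ∈ L, x ∈ K) :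
    ((K.filter p).map (fun k => (L.count k : Int))).sum = (L.countP p : Int) := by
  induction L with
  | nil => simp
  | cons x L ih =>
    have hsub' : ∀ y ∈ L, y ∈ K := fun y hy => hsub y (List.mem_cons_of_mem _ hy)
    have hx : x ∈ K := hsub x (List.mem_cons_self ..)
    have hmap : ((K.filter p).map (fun k => (((x :: L).count k : Nat) : Int)))
        = ((K.filter p).map (fun k => (L.count k : Int) + (if k = x then (1 : Int) else 0))) := by
      apply List.map_congr_left
      intro k _
      rw [List.count_cons]
      push_cast
      by_cases hk : k = x
      · simp [hk]
      · simp [hk, Ne.symm hk]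
    rw [hmap, PySem.List.sum_map_add_int, ih hsub', sum_indicator K x p hnd hx,
      List.countP_cons]
    push_cast
    ring

-- ===== VERDICT (by name: the statement is the Claim_ definition above) =====
theorem count_uncommon_bigrams_spec : Claim_equal_count_uncommon_bigrams := by
  intro domain u _
  unfold Spec_count_uncommon_bigrams count_uncommon_bigrams count_uncommon_bigrams_alt
  simp only []
  rw [PySem.List.foldl_if_add_one]
  rw [PySem.Dict.foldl_insert_getD_add_one_eq_counter, PySem.Dict.items_counter]
  rw [List.filter_map, List.map_map]
  simp only [Function.comp_def]
  rw [sum_counts _ _ _ (PySem.Set.nodup_ofList _) (fun x hx => (PySem.Set.mem_ofList _ _).mpr hx)]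
  rw [← bigrams_eq]
  rw [List.countP_map]
  simp [Function.comp_def]
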